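-- pv_equiv track=rewrite | github.com/sue-zadeh/python-test | codesignal.py | solution
-- ===== SOURCE A (Python) =====
-- def solution(s):
--     result = []
--     for i in range(0, len(s) - 1, 2):
--         result.append(s[i + 1])
--         result.append(s[i])
--
--     if len(s) % 2 != 0:
--         result.append(s[-1])  # only this line should be under the if
--
--     final = ""                # moved out
--     for char in result:       # moved out
--         final += char         # moved out
--
--     return final
-- ===== SOURCE B (Python) =====
-- def solution(s):
--     evens = s[::2]
--     odds = s[1::2]
--     out = "".join(o + e for o, e in zip(odds, evens))
--     if len(odds) < len(evens):
--         out += s[-1]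
--     return out
-- ===== Notes on version B (the rewrite author's own statement) =====
-- stated objective: idiomatic
-- what changed: Replaces A's stride-2 index loop (appending s[i+1], s[i]) and its char-by-char string accumulation with slicing the even- and odd-position characters and joining zip(odds, evens), appending the trailing char for odd length.
import Mathlib
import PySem

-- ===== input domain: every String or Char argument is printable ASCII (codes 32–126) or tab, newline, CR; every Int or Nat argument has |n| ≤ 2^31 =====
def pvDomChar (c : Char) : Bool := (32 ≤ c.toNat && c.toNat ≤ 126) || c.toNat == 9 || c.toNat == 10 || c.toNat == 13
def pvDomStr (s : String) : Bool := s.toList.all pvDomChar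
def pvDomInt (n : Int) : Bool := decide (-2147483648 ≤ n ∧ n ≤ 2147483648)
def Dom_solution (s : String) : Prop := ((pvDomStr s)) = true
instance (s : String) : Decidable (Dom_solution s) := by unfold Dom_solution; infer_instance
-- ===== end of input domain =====

-- B swaps adjacent pairs by zipping the odd-stride and even-stride slices instead of
-- A's index loop with stride 2 (objective: idiomatic; same linear cost).

-- ===== PORT A =====
def solution (s : String) : String :=
  let cs := s.toList
  let result : List Char :=
    (PySem.List.pyRange 0 ((cs.length : Int) - 1) 2).foldl
      (fun acc i => acc ++ [PySem.List.pyGetD cs (i + 1) ' ', PySem.List.pyGetD cs i ' ']) []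
  let result := if (cs.length : Int) % 2 ≠ 0 then result ++ [PySem.List.pyGetD cs (-1) ' '] else result
  result.foldl (fun acc c => acc.push c) ""

-- ===== PORT B =====
def solution_alt (s : String) : String :=
  let cs := s.toList
  let evens := (PySem.List.slice? cs none none 2).getD []
  let odds := (PySem.List.slice? cs (some 1) none 2).getD []
  let core := (odds.zip evens).flatMap (fun p => [p.1, p.2])
  String.ofList (if odds.length < evens.length then core ++ [PySem.List.pyGetD cs (-1) ' '] else core)

-- ===== PRECONDITION & SPEC =====
def Spec_solution (s : String) (out : String) : Prop := out = solution_alt s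
instance (s : String) (out : String) : Decidable (Spec_solution s out) := by unfold Spec_solution; infer_instance

-- ===== CLAIM (what is proved, stated in full; the proofs are below) =====
def Claim_equal_solution : Prop := ∀ (s : String), Dom_solution s → Spec_solution s (solution s)

-- ===== LEMMAS AND PROOFS =====

-- a filterMap over range is a map, when every index yields `some`
lemma filterMap_range_eq_map {α : Type} (f : Nat → Option α) (g : Nat → α) (m : Nat)
    (h : ∀ k < m, f k = some (g k)) :
    (List.range m).filterMap f = (List.range m).map g := by
  induction m with
  | zero => simp
  | succ m ih =>
    rw [List.range_succ, List.filterMap_append, List.map_append,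
      ih (fun k hk => h k (Nat.lt_succ_of_lt hk))]
    simp [h m (Nat.lt_succ_self m)]

-- the even-stride slice s[::2], as a map over indices
lemma evens_eq (cs : List Char) :
    (PySem.List.slice? cs none none 2).getD [] =
      (List.range ((cs.length + 1) / 2)).map (fun k => cs.getD (2 * k) ' ') := by
  unfold PySem.List.slice? PySem.List.sliceIndices
  norm_num
  have hcnt : (if 0 < cs.length then (((cs.length : Int) + 2 - 1) / 2).toNat else 0)
      = (cs.length + 1) / 2 := by split <;> omega
  rw [hcnt]
  apply filterMap_range_eq_map
  intro k hk
  have h2 : 2 * k < cs.length := by omega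
  have ht : (2 * (k : Int)).toNat = 2 * k := by omega
  rw [ht, List.getElem?_eq_getElem h2]
  simp

-- the odd-stride slice s[1::2], as a map over indices
lemma odds_eq (cs : List Char) :
    (PySem.List.slice? cs (some 1) none 2).getD [] =
      (List.range (cs.length / 2)).map (fun k => cs.getD (2 * k + 1) ' ') := by
  unfold PySem.List.slice? PySem.List.sliceIndices
  norm_num
  by_cases hn : cs.length = 0
  · simp [hn]
  · have hmin : min 1 (cs.length : Int) = 1 := by omega
    rw [hmin]
    have hcnt : (if 1 < cs.length then (((cs.length : Int) - 1 + 2 - 1) / 2).toNat else 0)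
        = cs.length / 2 := by split <;> omega
    rw [hcnt]
    apply filterMap_range_eq_map
    intro k hk
    have h2 : 2 * k + 1 < cs.length := by omega
    have ht : (1 + 2 * (k : Int)).toNat = 2 * k + 1 := by omega
    rw [ht, List.getElem?_eq_getElem h2]
    simp

-- A's stride-2 index loop, as a flatMap over pair indices
lemma acore_eq (cs : List Char) :
    (PySem.List.pyRange 0 ((cs.length : Int) - 1) 2).foldl
      (fun acc i => acc ++ [PySem.List.pyGetD cs (i + 1) ' ', PySem.List.pyGetD cs i ' ']) []
    = (List.range (cs.length / 2)).flatMap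
        (fun k => [cs.getD (2 * k + 1) ' ', cs.getD (2 * k) ' ']) := by
  rw [PySem.List.pyRange_of_pos 0 ((cs.length : Int) - 1) (by norm_num),
    List.foldl_map, PySem.List.foldl_append_eq_flatMap]
  have hcnt : (if (0 : Int) < (cs.length : Int) - 1
        then (((cs.length : Int) - 1 - 0 + 2 - 1) / 2).toNat else 0) = cs.length / 2 := by
    split <;> omega
  rw [hcnt]
  have hf : (fun (k : Nat) => [PySem.List.pyGetD cs (0 + 2 * (k : Int) + 1) ' ',
        PySem.List.pyGetD cs (0 + 2 * (k : Int)) ' '])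
      = fun (k : Nat) => [cs.getD (2 * k + 1) ' ', cs.getD (2 * k) ' '] := by
    funext k
    have e1 : (0 + 2 * (k : Int) + 1) = ((2 * k + 1 : Nat) : Int) := by push_cast; ring
    have e2 : (0 + 2 * (k : Int)) = ((2 * k : Nat) : Int) := by push_cast; ring
    rw [e1, e2, PySem.List.pyGetD_natCast, PySem.List.pyGetD_natCast]
  rw [List.nil_append, hf]

-- B's zip of the two slice-maps, flattened, equals A's pair flatMap
lemma zipcore_eq (cs : List Char) :
    ((((List.range (cs.length / 2)).map (fun k => cs.getD (2 * k + 1) ' ')).zip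
      ((List.range ((cs.length + 1) / 2)).map (fun k => cs.getD (2 * k) ' '))).flatMap
        (fun p => [p.1, p.2]))
    = (List.range (cs.length / 2)).flatMap
        (fun k => [cs.getD (2 * k + 1) ' ', cs.getD (2 * k) ' ']) := by
  have hd : (cs.length + 1) / 2 = cs.length / 2 + ((cs.length + 1) / 2 - cs.length / 2) := by omega
  rw [hd, List.range_add, List.map_append]
  have hz := List.zip_append
    (l₁ := (List.range (cs.length / 2)).map (fun k => cs.getD (2 * k + 1) ' '))
    (r₁ := ([] : List Char))
    (l₂ := (List.range (cs.length / 2)).map (fun k => cs.getD (2 * k) ' '))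
    (r₂ := ((List.range ((cs.length + 1) / 2 - cs.length / 2)).map (fun x => cs.length / 2 + x)).map
      (fun k => cs.getD (2 * k) ' '))
    (by simp)
  rw [List.append_nil] at hz
  rw [hz]
  simp [List.zip_map', List.flatMap_map]

-- the string-building loop `final += char`
lemma foldl_push (l : List Char) (acc : String) :
    l.foldl (fun a c => a.push c) acc = acc ++ String.ofList l := by
  induction l generalizing acc with
  | nil => simp
  | cons a t ih =>
    rw [List.foldl_cons, ih]
    apply String.ext
    simp

-- ===== VERDICT (by name: the statement is the Claim_ definition above) =====
theorem solution_spec : Claim_equal_solution := by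
  intro s _
  unfold Spec_solution solution solution_alt
  simp only [acore_eq, evens_eq, odds_eq, foldl_push, zipcore_eq, List.length_map,
    List.length_range, String.empty_append]
  by_cases hodd : (s.toList.length : Int) % 2 ≠ 0
  · have hlt : s.toList.length / 2 < (s.toList.length + 1) / 2 := by omega
    rw [if_pos hodd, if_pos hlt]
  · have hlt : ¬ s.toList.length / 2 < (s.toList.length + 1) / 2 := by omega
    rw [if_neg hodd, if_neg hlt]
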